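-- pv_equiv track=rewrite | github.com/JanReyesMorales55/enigma | enigma/rotors.py | validar_permutacio
-- ===== SOURCE A (Python) =====
-- alfabet = "ABCDEFGHIJKLMNOPQRSTUVWXYZ"
--
-- def validar_permutacio(w):
--     if len(w) != 26:
--         return False
--     for c in w:
--         if c not in alfabet:
--             return False
--     if len(set(w)) != 26:
--         return False
--     return True
-- ===== SOURCE B (Python) =====
-- alfabet = "ABCDEFGHIJKLMNOPQRSTUVWXYZ"
--
-- def validar_permutacio(w):
--     return len(w) == 26 and sorted(w) == list(alfabet)
-- ===== Notes on version B (the rewrite author's own statement) =====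
-- stated objective: simpler
-- what changed: Replaces the per-character membership loop plus a separate len(set(...)) uniqueness check with a single length guard and a sort-and-compare against the alphabet.
import Mathlib
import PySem

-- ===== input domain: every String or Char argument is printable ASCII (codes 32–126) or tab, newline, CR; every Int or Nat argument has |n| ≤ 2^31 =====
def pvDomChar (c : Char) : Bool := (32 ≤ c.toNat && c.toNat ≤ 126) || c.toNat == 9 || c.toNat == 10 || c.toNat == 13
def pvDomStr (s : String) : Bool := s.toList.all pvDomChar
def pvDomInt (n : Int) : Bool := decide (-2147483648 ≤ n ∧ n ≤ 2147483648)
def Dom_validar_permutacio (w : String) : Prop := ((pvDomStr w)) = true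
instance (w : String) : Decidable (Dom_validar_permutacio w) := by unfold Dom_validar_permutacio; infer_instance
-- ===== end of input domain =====

-- B replaces A's membership loop + len(set(...)) uniqueness check by one
-- length guard and a sort-and-compare against the alphabet (objective: simpler).

def alfabet : String := "ABCDEFGHIJKLMNOPQRSTUVWXYZ"

-- ===== PORT A =====
def validar_permutacio (w : String) : Bool :=
  if w.toList.length ≠ 26 then false
  else if w.toList.any (fun c => !(alfabet.toList.contains c)) then false  -- the for-loop's early 'return False'
  else if (PySem.Set.ofList w.toList).length ≠ 26 then false
  else true

-- ===== PORT B =====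
def validar_permutacio_alt (w : String) : Bool :=
  w.toList.length == 26 && (PySem.List.sorted w.toList (fun c => c) false == alfabet.toList)

-- ===== PRECONDITION & SPEC =====
def Spec_validar_permutacio (w : String) (out : Bool) : Prop := out = validar_permutacio_alt w
instance (w : String) (out : Bool) : Decidable (Spec_validar_permutacio w out) := by unfold Spec_validar_permutacio; infer_instance

-- ===== CLAIM (what is proved, stated in full; the proofs are below) =====
def Claim_equal_validar_permutacio : Prop := ∀ (w : String), Dom_validar_permutacio w → Spec_validar_permutacio w (validar_permutacio w)

-- ===== LEMMAS AND PROOFS =====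

theorem alfabet_nodup : (alfabet.toList).Nodup := by decide

theorem alfabet_sorted_lt : (alfabet.toList).Pairwise (fun a b : Char => a < b) := by decide

theorem alfabet_len : (alfabet.toList).length = 26 := by decide

-- Core: for a 26-char list, A's two checks hold iff sorting yields the alphabet.
theorem core (cs : List Char) (hlen : cs.length = 26) :
    ((∀ c ∈ cs, c ∈ alfabet.toList) ∧ (PySem.Set.ofList cs).length = 26) ↔
      PySem.List.sorted cs (fun c => c) false = alfabet.toList := by
  constructor
  · rintro ⟨hsub, hcard⟩
    -- ofList cs is nodup, its members lie in alfabet, and it has full length 26,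
    -- hence ofList cs ~ alfabet, hence alfabet ⊆ cs, hence alfabet ~ cs.
    have hnd : (PySem.Set.ofList cs).Nodup := PySem.Set.nodup_ofList cs
    have hsub' : (PySem.Set.ofList cs) ⊆ alfabet.toList := by
      intro x hx
      exact hsub x ((PySem.Set.mem_ofList _ _).1 hx)
    have hsp := List.subperm_of_subset hnd hsub'
    have hperm1 : (PySem.Set.ofList cs).Perm alfabet.toList := by
      apply hsp.perm_of_length_le
      rw [hcard, alfabet_len]
    have halsub : alfabet.toList ⊆ cs := by
      intro x hx
      exact (PySem.Set.mem_ofList _ _).1 (hperm1.mem_iff.2 hx)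
    have hsp2 := List.subperm_of_subset alfabet_nodup halsub
    have hperm : alfabet.toList.Perm cs := by
      apply hsp2.perm_of_length_le
      rw [hlen, alfabet_len]
    exact PySem.List.sorted_eq_of_perm_of_pairwise_lt cs alfabet.toList (fun c => c) hperm alfabet_sorted_lt
  · intro hs
    have hperm : cs.Perm alfabet.toList := by
      have := PySem.List.sorted_perm cs (fun c : Char => c) false
      rw [hs] at this
      exact this.symm
    refine ⟨fun c hc => hperm.mem_iff.1 hc, ?_⟩
    have hnd : cs.Nodup := hperm.nodup_iff.2 alfabet_nodup
    rw [PySem.Set.ofList_eq_self_of_nodup cs hnd, hlen]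

-- ===== VERDICT (by name: the statement is the Claim_ definition above) =====
theorem validar_permutacio_spec : Claim_equal_validar_permutacio := by
  intro w _
  unfold Spec_validar_permutacio
  by_cases hlen : w.toList.length = 26
  · have hlen' : w.length = 26 := by simpa using hlen
    by_cases hsort : PySem.List.sorted w.toList (fun c => c) false = alfabet.toList
    · obtain ⟨h1, h2⟩ := (core w.toList hlen).2 hsort
      simp [validar_permutacio, validar_permutacio_alt, hlen, hsort, h2]
      intro c hc
      exact h1 c hc
    · have h : ¬ ((∀ c ∈ w.toList, c ∈ alfabet.toList) ∧ (PySem.Set.ofList w.toList).length = 26) :=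
        fun hh => hsort ((core w.toList hlen).1 hh)
      by_cases hany : (w.toList.any (fun c => !(alfabet.toList.contains c))) = true
      · have hex : ∃ x ∈ w.toList, x ∉ alfabet.toList := by
          simpa [List.any_eq_true, List.contains_eq_mem] using hany
        simp [validar_permutacio, validar_permutacio_alt, hlen, hsort, hex]
      · have h1 : ∀ c ∈ w.toList, c ∈ alfabet.toList := by
          simp only [List.any_eq_true, not_exists, not_and,
            Bool.not_eq_true', List.contains_eq_mem] at hany
          intro c hc
          simpa using hany c hc
        have h2 : (PySem.Set.ofList w.toList).length ≠ 26 := fun hc => h ⟨h1, hc⟩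
        simp [validar_permutacio, validar_permutacio_alt, hlen, hsort, h2]
  · have hlen' : ¬ w.length = 26 := by simpa using hlen
    simp [validar_permutacio, validar_permutacio_alt, hlen']
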